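-- pv_equiv track=rewrite | github.com/AricayaJohn/playground | TDSA/95exhaustiveRecursion.py | generate
-- ===== SOURCE A (Python) =====
-- def generate(words, synonyms):
--     if len(words) == 0:
-- #basecase: empty input leads to one empty sentence
--         return [[]]
--
--     first_word = words[0]
--     remaining_words = words[1:]
--
-- #recursive call on the rest of the words
--     subarrays = generate(remaining_words, synonyms)
--
--     if first_word in synonyms:
--         result = []
-- #for each synonyms, prepend it to the combinations
--         for synonym in synonyms[first_word]:
--             result += [ [synonym, *subarray] for subarray in subarrays ]
--         return result
--     else:
-- #no synonym: keep original word
--         return [ [first_word, *subarray] for subarray in subarrays]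
-- ===== SOURCE B (Python) =====
-- def generate(words, synonyms):
--     choices = [synonyms[w] if w in synonyms else [w] for w in words]
--     acc = [[]]
--     for choice in choices:
--         acc = [partial + [s] for partial in acc for s in choice]
--     return acc
-- ===== Notes on version B (the rewrite author's own statement) =====
-- stated objective: simpler
-- what changed: Replaces the recursion with a precomputed per-word choice list followed by a single left-to-right iterative accumulator that extends every partial sentence.
import Mathlib
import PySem

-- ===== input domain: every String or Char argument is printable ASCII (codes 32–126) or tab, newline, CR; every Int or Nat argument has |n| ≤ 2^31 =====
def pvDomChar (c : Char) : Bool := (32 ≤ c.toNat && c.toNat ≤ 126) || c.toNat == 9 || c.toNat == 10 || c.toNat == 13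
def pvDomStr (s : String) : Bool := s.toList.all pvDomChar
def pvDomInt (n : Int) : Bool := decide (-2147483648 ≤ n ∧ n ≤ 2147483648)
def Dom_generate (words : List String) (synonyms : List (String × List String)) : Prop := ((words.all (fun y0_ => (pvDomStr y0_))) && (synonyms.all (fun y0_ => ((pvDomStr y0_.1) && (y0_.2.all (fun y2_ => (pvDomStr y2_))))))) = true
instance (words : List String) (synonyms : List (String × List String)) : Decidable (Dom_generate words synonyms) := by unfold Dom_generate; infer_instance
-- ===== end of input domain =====

-- B replaces A's recursion by a precomputed choice list and one iterative accumulator pass (simpler decomposition, same cost).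

-- dict lookup (first match in the association list), shared by both ports
def pvLookup (synonyms : List (String × List String)) (w : String) : Option (List String) :=
  match synonyms with
  | [] => none
  | (k, v) :: rest => if k == w then some v else pvLookup rest w

-- ===== PORT A =====
def generate (words : List String) (synonyms : List (String × List String)) : List (List String) :=
  match words with
  | [] => [[]]
  | first_word :: remaining_words =>
    let subarrays := generate remaining_words synonyms
    match pvLookup synonyms first_word with
    | some syns =>
        -- result = []; for synonym in syns: result += [[synonym, *subarray] for subarray in subarrays]
        syns.foldl (fun result synonym => result ++ subarrays.map (fun subarray => synonym :: subarray)) []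
    | none => subarrays.map (fun subarray => first_word :: subarray)

-- ===== PORT B =====
def generate_alt (words : List String) (synonyms : List (String × List String)) : List (List String) :=
  let choices := words.map (fun w => match pvLookup synonyms w with | some s => s | none => [w])
  choices.foldl (fun acc choice => acc.flatMap (fun partial_ => choice.map (fun s => partial_ ++ [s]))) [[]]

-- ===== PRECONDITION & SPEC =====
def Spec_generate (words : List String) (synonyms : List (String × List String)) (out : List (List String)) : Prop := out = generate_alt words synonyms
instance (words : List String) (synonyms : List (String × List String)) (out : List (List String)) : Decidable (Spec_generate words synonyms out) := by unfold Spec_generate; infer_instance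

-- ===== CLAIM (what is proved, stated in full; the proofs are below) =====
def Claim_equal_generate : Prop := ∀ (words : List String) (synonyms : List (String × List String)), Dom_generate words synonyms → Spec_generate words synonyms (generate words synonyms)

-- ===== LEMMAS AND PROOFS =====

-- the common cartesian product both ports compute
def pvCart (choices : List (List String)) : List (List String) :=
  match choices with
  | [] => [[]]
  | ch :: rest => ch.flatMap (fun s => (pvCart rest).map (fun t => s :: t))

theorem generate_eq_cart (words : List String) (synonyms : List (String × List String)) :
    generate words synonyms =
      pvCart (words.map (fun w => match pvLookup synonyms w with | some s => s | none => [w])) := by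
  induction words with
  | nil => simp [generate, pvCart]
  | cons w rest ih =>
    simp only [generate, List.map_cons, pvCart, ih]
    cases pvLookup synonyms w with
    | none => simp
    | some syns => simp [List.flatMap]

theorem alt_foldl_eq (choices : List (List String)) (acc : List (List String)) :
    choices.foldl (fun acc choice => acc.flatMap (fun p => choice.map (fun s => p ++ [s]))) acc
      = acc.flatMap (fun p => (pvCart choices).map (fun t => p ++ t)) := by
  induction choices generalizing acc with
  | nil => simp [pvCart]
  | cons ch rest ih =>
    simp only [List.foldl_cons, ih, pvCart]
    simp [List.flatMap_assoc, List.flatMap_map, List.map_flatMap, List.map_map, Function.comp_def, List.append_assoc]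

theorem generate_alt_eq_cart (words : List String) (synonyms : List (String × List String)) :
    generate_alt words synonyms =
      pvCart (words.map (fun w => match pvLookup synonyms w with | some s => s | none => [w])) := by
  simp [generate_alt, alt_foldl_eq]

-- ===== VERDICT (by name: the statement is the Claim_ definition above) =====
theorem generate_spec : Claim_equal_generate := by
  intro words synonyms _
  unfold Spec_generate
  rw [generate_eq_cart, generate_alt_eq_cart]
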